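-- pv_equiv track=rewrite | github.com/mBrond/mheBrondani | lib/Utilidades.py | organizarIndices
-- ===== SOURCE A (Python) =====
-- def organizarIndices(ordem_execucao, codigo_operacoes_hidrologicas):
--     """Funcao que cria os indices para as matrizes de hidrogramas."""
--     #   codigo_operacoes_hidrologicas =  1->CHUVA-VAZAO; 2->PULS; 3->MKC; 4->JUNCAO; 5->HIDROGRAMA; Nao esta' ordenada; Tem len() == nop
--     #   ordem_execucao = INDICES das operacoes ordenados conforme ordem de execucao; Tem len() == nop
--
--     #   Declarar variaveis
--     indices_saida_pq        = []
--     indices_saida_puls      = []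
--     indices_saida_mkc       = []
--     indices_saida_jun       = []
--     indices_saida_hidro     = []
--     indices_saida_derivacao = []
--
--     #   Ordenar os codigos
--     for indice_entrada, indice_ordenado in enumerate(ordem_execucao):
--         #   Se a operacao for PQ
--         if codigo_operacoes_hidrologicas[indice_entrada] == 1:
--             #   Preencho a variavel
--             indices_saida_pq.append(indice_ordenado)
--         #   Se a operacao for PULS
--         elif codigo_operacoes_hidrologicas[indice_entrada] == 2:
--             #   Preencho a variavel
--             indices_saida_puls.append(indice_ordenado)
--         #   Se a operacao for MKC
--         elif codigo_operacoes_hidrologicas[indice_entrada] == 3: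
--             #   Preencho a variavel
--             indices_saida_mkc.append(indice_ordenado)
--         #   Se a operacao for JUN
--         elif codigo_operacoes_hidrologicas[indice_entrada] == 4:
--             #   Preencho a variavel
--             indices_saida_jun.append(indice_ordenado)
--         #   Se a operacao for leitura de hidrograma
--         elif codigo_operacoes_hidrologicas[indice_entrada] == 5:
--             indices_saida_hidro.append(indice_ordenado)
--         #   Se a operacao for DERIVACAO
--         elif codigo_operacoes_hidrologicas[indice_entrada] == 6:
--             indices_saida_derivacao.append(indice_ordenado)
--
--     return indices_saida_pq, indices_saida_puls, indices_saida_mkc, indices_saida_jun, indices_saida_hidro, indices_saida_derivacao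
-- ===== SOURCE B (Python) =====
-- def organizarIndices(ordem_execucao, codigo_operacoes_hidrologicas):
--     """Funcao que cria os indices para as matrizes de hidrogramas."""
--     pares = list(zip(codigo_operacoes_hidrologicas, ordem_execucao))
--     return tuple([i for c, i in pares if c == k] for k in (1, 2, 3, 4, 5, 6))
-- ===== Notes on version B (the rewrite author's own statement) =====
-- stated objective: idiomatic
-- what changed: Replaces the single indexing-and-branching pass with six filtered comprehensions over a zip of codes and indices, removing the enumerate/index lookup entirely.
import Mathlib
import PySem

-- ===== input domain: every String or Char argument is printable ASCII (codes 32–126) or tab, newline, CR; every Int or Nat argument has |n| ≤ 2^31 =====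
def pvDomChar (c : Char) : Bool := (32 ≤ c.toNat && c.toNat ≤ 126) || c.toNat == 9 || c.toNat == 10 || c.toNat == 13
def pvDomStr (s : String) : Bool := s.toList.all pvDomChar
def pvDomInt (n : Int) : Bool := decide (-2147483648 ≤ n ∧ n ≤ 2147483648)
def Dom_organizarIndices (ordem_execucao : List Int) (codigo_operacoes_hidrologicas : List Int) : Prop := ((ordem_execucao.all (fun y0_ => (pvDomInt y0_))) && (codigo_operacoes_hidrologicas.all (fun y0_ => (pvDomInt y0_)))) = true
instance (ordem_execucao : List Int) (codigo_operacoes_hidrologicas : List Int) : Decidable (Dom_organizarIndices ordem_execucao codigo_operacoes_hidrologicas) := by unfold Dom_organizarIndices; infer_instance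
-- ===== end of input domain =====

-- B replaces A's single indexing-and-branching pass with six filters over zip(codigo, ordem): idiomatic, same cost.

-- ===== PORT A =====
-- one step of A's loop body: looks up the code at the enumerate position, then the if/elif chain appends
def pvStepA (codigo : List Int)
    (acc : List Int × List Int × List Int × List Int × List Int × List Int) (p : Int × Int) :
    List Int × List Int × List Int × List Int × List Int × List Int :=
  match PySem.List.pyGet? codigo p.1 with
  | none => acc  -- Python raises IndexError here; Pre_ excludes these inputs
  | some c =>
    if c = 1 then (acc.1 ++ [p.2], acc.2.1, acc.2.2.1, acc.2.2.2.1, acc.2.2.2.2.1, acc.2.2.2.2.2)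
    else if c = 2 then (acc.1, acc.2.1 ++ [p.2], acc.2.2.1, acc.2.2.2.1, acc.2.2.2.2.1, acc.2.2.2.2.2)
    else if c = 3 then (acc.1, acc.2.1, acc.2.2.1 ++ [p.2], acc.2.2.2.1, acc.2.2.2.2.1, acc.2.2.2.2.2)
    else if c = 4 then (acc.1, acc.2.1, acc.2.2.1, acc.2.2.2.1 ++ [p.2], acc.2.2.2.2.1, acc.2.2.2.2.2)
    else if c = 5 then (acc.1, acc.2.1, acc.2.2.1, acc.2.2.2.1, acc.2.2.2.2.1 ++ [p.2], acc.2.2.2.2.2)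
    else if c = 6 then (acc.1, acc.2.1, acc.2.2.1, acc.2.2.2.1, acc.2.2.2.2.1, acc.2.2.2.2.2 ++ [p.2])
    else acc

def organizarIndices (ordem_execucao : List Int) (codigo_operacoes_hidrologicas : List Int) : List Int × List Int × List Int × List Int × List Int × List Int :=
  (PySem.List.enumerate ordem_execucao).foldl (pvStepA codigo_operacoes_hidrologicas)
    ([], [], [], [], [], [])

-- ===== PORT B =====
def organizarIndices_alt (ordem_execucao : List Int) (codigo_operacoes_hidrologicas : List Int) : List Int × List Int × List Int × List Int × List Int × List Int :=
  let pares := codigo_operacoes_hidrologicas.zip ordem_execucao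
  ((pares.filter (fun p => p.1 == 1)).map Prod.snd,
   (pares.filter (fun p => p.1 == 2)).map Prod.snd,
   (pares.filter (fun p => p.1 == 3)).map Prod.snd,
   (pares.filter (fun p => p.1 == 4)).map Prod.snd,
   (pares.filter (fun p => p.1 == 5)).map Prod.snd,
   (pares.filter (fun p => p.1 == 6)).map Prod.snd)

-- ===== PRECONDITION & SPEC =====
-- A indexes codigo_operacoes_hidrologicas at every position of ordem_execucao, so it raises
-- IndexError when the code list is shorter than the order list; Pre_ excludes exactly those inputs.
def Pre_organizarIndices (ordem_execucao : List Int) (codigo_operacoes_hidrologicas : List Int) : Prop :=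
  ordem_execucao.length ≤ codigo_operacoes_hidrologicas.length
instance (ordem_execucao : List Int) (codigo_operacoes_hidrologicas : List Int) : Decidable (Pre_organizarIndices ordem_execucao codigo_operacoes_hidrologicas) := by unfold Pre_organizarIndices; infer_instance

def pvWitness_organizarIndices : List Int × List Int := ([2, 0, 1], [1, 6, 1])

def Spec_organizarIndices (ordem_execucao : List Int) (codigo_operacoes_hidrologicas : List Int) (out : List Int × List Int × List Int × List Int × List Int × List Int) : Prop := out = organizarIndices_alt ordem_execucao codigo_operacoes_hidrologicas
instance (ordem_execucao : List Int) (codigo_operacoes_hidrologicas : List Int) (out : List Int × List Int × List Int × List Int × List Int × List Int) : Decidable (Spec_organizarIndices ordem_execucao codigo_operacoes_hidrologicas out) := by unfold Spec_organizarIndices; infer_instance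

-- ===== CLAIM (what is proved, stated in full; the proofs are below) =====
def Claim_equal_organizarIndices : Prop := ∀ (ordem_execucao : List Int) (codigo_operacoes_hidrologicas : List Int), Dom_organizarIndices ordem_execucao codigo_operacoes_hidrologicas → Pre_organizarIndices ordem_execucao codigo_operacoes_hidrologicas → Spec_organizarIndices ordem_execucao codigo_operacoes_hidrologicas (organizarIndices ordem_execucao codigo_operacoes_hidrologicas)
-- ===== LEMMAS AND PROOFS =====

-- the loop body of A, re-expressed on a (code, index) pair (used only by the proofs)
def pvStepZ (acc : List Int × List Int × List Int × List Int × List Int × List Int) (p : Int × Int) :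
    List Int × List Int × List Int × List Int × List Int × List Int :=
  if p.1 = 1 then (acc.1 ++ [p.2], acc.2.1, acc.2.2.1, acc.2.2.2.1, acc.2.2.2.2.1, acc.2.2.2.2.2)
  else if p.1 = 2 then (acc.1, acc.2.1 ++ [p.2], acc.2.2.1, acc.2.2.2.1, acc.2.2.2.2.1, acc.2.2.2.2.2)
  else if p.1 = 3 then (acc.1, acc.2.1, acc.2.2.1 ++ [p.2], acc.2.2.2.1, acc.2.2.2.2.1, acc.2.2.2.2.2)
  else if p.1 = 4 then (acc.1, acc.2.1, acc.2.2.1, acc.2.2.2.1 ++ [p.2], acc.2.2.2.2.1, acc.2.2.2.2.2)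
  else if p.1 = 5 then (acc.1, acc.2.1, acc.2.2.1, acc.2.2.2.1, acc.2.2.2.2.1 ++ [p.2], acc.2.2.2.2.2)
  else if p.1 = 6 then (acc.1, acc.2.1, acc.2.2.1, acc.2.2.2.1, acc.2.2.2.2.1, acc.2.2.2.2.2 ++ [p.2])
  else acc

-- A's enumerate loop from position s equals a fold of pvStepZ over the zip of the remaining codes
theorem pvFoldA_eq_foldZip (ordem : List Int) : ∀ (codigo : List Int) (s : Nat) acc,
    s + ordem.length ≤ codigo.length →
    (PySem.List.enumerate ordem (s : Int)).foldl (pvStepA codigo) acc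
      = ((codigo.drop s).zip ordem).foldl pvStepZ acc := by
  induction ordem with
  | nil => intro codigo s acc h; simp [PySem.List.enumerate_nil]
  | cons x xs ih =>
    intro codigo s acc h
    simp only [List.length_cons] at h
    have hs : s < codigo.length := by omega
    have hdrop : codigo.drop s = codigo[s] :: codigo.drop (s + 1) :=
      (List.drop_eq_getElem_cons hs)
    rw [PySem.List.enumerate_cons, hdrop]
    simp only [List.foldl_cons, List.zip_cons_cons]
    have hget : PySem.List.pyGet? codigo (s : Int) = some codigo[s] := by
      simp [PySem.List.pyGet?_natCast, List.getElem?_eq_getElem hs]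
    have hstep : pvStepA codigo acc ((s : Int), x) = pvStepZ acc (codigo[s], x) := by
      simp [pvStepA, pvStepZ, hget]
    rw [hstep]
    have : ((s : Int) + 1) = ((s + 1 : Nat) : Int) := by push_cast; ring
    rw [this, ih codigo (s + 1) _ (by omega)]

-- folding pvStepZ appends the six filtered projections to the accumulators
theorem pvFoldZ_filters (pares : List (Int × Int)) : ∀ a1 a2 a3 a4 a5 a6,
    pares.foldl pvStepZ (a1, a2, a3, a4, a5, a6)
      = (a1 ++ (pares.filter (fun p => p.1 == 1)).map Prod.snd,
         a2 ++ (pares.filter (fun p => p.1 == 2)).map Prod.snd,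
         a3 ++ (pares.filter (fun p => p.1 == 3)).map Prod.snd,
         a4 ++ (pares.filter (fun p => p.1 == 4)).map Prod.snd,
         a5 ++ (pares.filter (fun p => p.1 == 5)).map Prod.snd,
         a6 ++ (pares.filter (fun p => p.1 == 6)).map Prod.snd) := by
  induction pares with
  | nil => simp
  | cons p ps ih =>
    intro a1 a2 a3 a4 a5 a6
    obtain ⟨c, i⟩ := p
    simp only [List.foldl_cons, List.filter_cons]
    by_cases h1 : c = 1
    · subst h1
      rw [show pvStepZ (a1,a2,a3,a4,a5,a6) ((1:Int),i) = (a1++[i],a2,a3,a4,a5,a6) from by simp [pvStepZ], ih]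
      simp
    · by_cases h2 : c = 2
      · subst h2
        rw [show pvStepZ (a1,a2,a3,a4,a5,a6) ((2:Int),i) = (a1,a2++[i],a3,a4,a5,a6) from by simp [pvStepZ], ih]
        simp
      · by_cases h3 : c = 3
        · subst h3
          rw [show pvStepZ (a1,a2,a3,a4,a5,a6) ((3:Int),i) = (a1,a2,a3++[i],a4,a5,a6) from by simp [pvStepZ], ih]
          simp
        · by_cases h4 : c = 4
          · subst h4
            rw [show pvStepZ (a1,a2,a3,a4,a5,a6) ((4:Int),i) = (a1,a2,a3,a4++[i],a5,a6) from by simp [pvStepZ], ih]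
            simp
          · by_cases h5 : c = 5
            · subst h5
              rw [show pvStepZ (a1,a2,a3,a4,a5,a6) ((5:Int),i) = (a1,a2,a3,a4,a5++[i],a6) from by simp [pvStepZ], ih]
              simp
            · by_cases h6 : c = 6
              · subst h6
                rw [show pvStepZ (a1,a2,a3,a4,a5,a6) ((6:Int),i) = (a1,a2,a3,a4,a5,a6++[i]) from by simp [pvStepZ], ih]
                simp
              · rw [show pvStepZ (a1,a2,a3,a4,a5,a6) (c,i) = (a1,a2,a3,a4,a5,a6) from by simp [pvStepZ, h1, h2, h3, h4, h5, h6], ih]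
                simp [h1, h2, h3, h4, h5, h6]

-- ===== VERDICT (by name: the statement is the Claim_ definition above) =====
theorem organizarIndices_spec : Claim_equal_organizarIndices := by
  intro ordem codigo _ hpre
  unfold Spec_organizarIndices organizarIndices organizarIndices_alt
  have h0 := pvFoldA_eq_foldZip ordem codigo 0 ([], [], [], [], [], []) (by simpa using hpre)
  simpa using (h0.trans (by simpa using pvFoldZ_filters (codigo.zip ordem) [] [] [] [] [] []))
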